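-- pv_equiv track=rewrite | github.com/dcuturic/ki_baddie | blend_to_vrm/converter.py | auto_map_expressions
-- ===== SOURCE A (Python) =====
-- EXPRESSION_PATTERNS = {
--     "happy": ["happy", "smile", "joy", "lachen", "freude", "froh", "grinsen"],
--     "angry": ["angry", "anger", "wut", "ärger", "böse", "zorn", "mad"],
--     "sad": ["sad", "sadness", "trauer", "traurig", "cry", "weinen"],
--     "relaxed": ["relaxed", "relax", "entspannt", "calm", "ruhig"],
--     "surprised": ["surprised", "surprise", "überrasch", "shock", "schock", "wow"],
--     "aa": ["aa", "a", "mouth_a", "vrc.v_aa", "mth_a", "あ"],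
--     "ih": ["ih", "i", "mouth_i", "vrc.v_ih", "mth_i", "い"],
--     "ou": ["ou", "u", "mouth_u", "vrc.v_ou", "mth_u", "う"],
--     "ee": ["ee", "e", "mouth_e", "vrc.v_ee", "mth_e", "え"],
--     "oh": ["oh", "o", "mouth_o", "vrc.v_oh", "mth_o", "お"],
--     "blink": ["blink", "blinzel", "close_eyes", "eye_close", "augen_zu"],
--     "blinkLeft": ["blink_l", "blink.l", "wink_l", "wink.l", "left_blink", "blink_left"],
--     "blinkRight": ["blink_r", "blink.r", "wink_r", "wink.r", "right_blink", "blink_right"],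
--     "lookUp": ["look_up", "lookup", "eye_up"],
--     "lookDown": ["look_down", "lookdown", "eye_down"],
--     "lookLeft": ["look_left", "lookleft", "eye_left"],
--     "lookRight": ["look_right", "lookright", "eye_right"],
--     "neutral": ["neutral", "default", "basis", "normal"],
-- }
--
-- def auto_map_expressions(shape_keys: dict) -> dict:
--     """Shape Keys automatisch zu VRM Expressions mappen."""
--     all_keys = []
--     for mesh_name, keys in shape_keys.items():
--         for key in keys:
--             all_keys.append((mesh_name, key))
--
--     mapping = {}  # vrm_expression → [(mesh_name, shape_key_name)]
--
--     for expr_name, patterns in EXPRESSION_PATTERNS.items():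
--         for mesh_name, key_name in all_keys:
--             clean = key_name.lower().strip()
--             for pat in patterns:
--                 if clean == pat.lower() or pat.lower() in clean:
--                     if expr_name not in mapping:
--                         mapping[expr_name] = []
--                     mapping[expr_name].append((mesh_name, key_name))
--                     break
--
--     return mapping
-- ===== SOURCE B (Python) =====
-- EXPRESSION_PATTERNS = {
--     "happy": ["happy", "smile", "joy", "lachen", "freude", "froh", "grinsen"],
--     "angry": ["angry", "anger", "wut", "ärger", "böse", "zorn", "mad"],
--     "sad": ["sad", "sadness", "trauer", "traurig", "cry", "weinen"],
--     "relaxed": ["relaxed", "relax", "entspannt", "calm", "ruhig"],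
--     "surprised": ["surprised", "surprise", "überrasch", "shock", "schock", "wow"],
--     "aa": ["aa", "a", "mouth_a", "vrc.v_aa", "mth_a", "あ"],
--     "ih": ["ih", "i", "mouth_i", "vrc.v_ih", "mth_i", "い"],
--     "ou": ["ou", "u", "mouth_u", "vrc.v_ou", "mth_u", "う"],
--     "ee": ["ee", "e", "mouth_e", "vrc.v_ee", "mth_e", "え"],
--     "oh": ["oh", "o", "mouth_o", "vrc.v_oh", "mth_o", "お"],
--     "blink": ["blink", "blinzel", "close_eyes", "eye_close", "augen_zu"],
--     "blinkLeft": ["blink_l", "blink.l", "wink_l", "wink.l", "left_blink", "blink_left"],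
--     "blinkRight": ["blink_r", "blink.r", "wink_r", "wink.r", "right_blink", "blink_right"],
--     "lookUp": ["look_up", "lookup", "eye_up"],
--     "lookDown": ["look_down", "lookdown", "eye_down"],
--     "lookLeft": ["look_left", "lookleft", "eye_left"],
--     "lookRight": ["look_right", "lookright", "eye_right"],
--     "neutral": ["neutral", "default", "basis", "normal"],
-- }
--
--
-- def auto_map_expressions(shape_keys: dict) -> dict:
--     """Two declarative stages instead of A's per-expression scans with a break:
--     stage 1 tags every shape key once with the SET of expression names it matches
--     (`pat in clean` alone suffices: equality implies containment); stage 2 groups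
--     the tagged keys by set membership, keeping only non-empty groups."""
--     all_keys = [(m, k) for m, ks in shape_keys.items() for k in ks]
--     tagged = []
--     for m, k in all_keys:
--         clean = k.lower().strip()
--         tags = {e for e, ps in EXPRESSION_PATTERNS.items()
--                 if any(p.lower() in clean for p in ps)}
--         tagged.append((m, k, tags))
--     result = {}
--     for e in EXPRESSION_PATTERNS:
--         hits = [(m, k) for m, k, tags in tagged if e in tags]
--         if hits:
--             result[e] = hits
--     return result
-- ===== Notes on version B (the rewrite author's own statement) =====
-- stated objective: alternative
-- what changed: Replaces A's imperative per-expression scans (break on first pattern, grow-dict-on-demand) by two declarative stages: stage 1 tags each shape key once with the SET of expression names whose patterns it matches under a simplified pure-substring test ('clean == pat.lower()' is dropped since equality implies containment), stage 2 groups keys per expression by set membership and keeps non-empty groups; key order of the output dict is the pattern-table order either way.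
import Mathlib
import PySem

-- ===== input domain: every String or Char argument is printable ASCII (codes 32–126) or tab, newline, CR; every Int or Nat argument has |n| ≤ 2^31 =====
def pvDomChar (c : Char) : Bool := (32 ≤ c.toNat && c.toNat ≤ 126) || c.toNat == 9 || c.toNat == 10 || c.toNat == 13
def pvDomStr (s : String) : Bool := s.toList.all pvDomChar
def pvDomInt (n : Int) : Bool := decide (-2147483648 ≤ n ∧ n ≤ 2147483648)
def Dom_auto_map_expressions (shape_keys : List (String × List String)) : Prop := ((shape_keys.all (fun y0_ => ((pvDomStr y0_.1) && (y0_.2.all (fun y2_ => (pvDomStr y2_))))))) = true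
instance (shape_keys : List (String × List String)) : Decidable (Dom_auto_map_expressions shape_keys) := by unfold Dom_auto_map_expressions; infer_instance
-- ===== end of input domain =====

-- B replaces A's imperative per-expression scans (break on first pattern, dict grown on demand) by two
-- declarative stages: tag each key once with the SET of matching expression names (pure substring test,
-- the redundant equality dropped), then group tagged keys per expression (objective: alternative).

-- the module constant EXPRESSION_PATTERNS (shared context of both programs)
def pvPatterns : List (String × List String) := [
  ("happy", ["happy", "smile", "joy", "lachen", "freude", "froh", "grinsen"]),
  ("angry", ["angry", "anger", "wut", "ärger", "böse", "zorn", "mad"]),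
  ("sad", ["sad", "sadness", "trauer", "traurig", "cry", "weinen"]),
  ("relaxed", ["relaxed", "relax", "entspannt", "calm", "ruhig"]),
  ("surprised", ["surprised", "surprise", "überrasch", "shock", "schock", "wow"]),
  ("aa", ["aa", "a", "mouth_a", "vrc.v_aa", "mth_a", "あ"]),
  ("ih", ["ih", "i", "mouth_i", "vrc.v_ih", "mth_i", "い"]),
  ("ou", ["ou", "u", "mouth_u", "vrc.v_ou", "mth_u", "う"]),
  ("ee", ["ee", "e", "mouth_e", "vrc.v_ee", "mth_e", "え"]),
  ("oh", ["oh", "o", "mouth_o", "vrc.v_oh", "mth_o", "お"]),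
  ("blink", ["blink", "blinzel", "close_eyes", "eye_close", "augen_zu"]),
  ("blinkLeft", ["blink_l", "blink.l", "wink_l", "wink.l", "left_blink", "blink_left"]),
  ("blinkRight", ["blink_r", "blink.r", "wink_r", "wink.r", "right_blink", "blink_right"]),
  ("lookUp", ["look_up", "lookup", "eye_up"]),
  ("lookDown", ["look_down", "lookdown", "eye_down"]),
  ("lookLeft", ["look_left", "lookleft", "eye_left"]),
  ("lookRight", ["look_right", "lookright", "eye_right"]),
  ("neutral", ["neutral", "default", "basis", "normal"])]

-- ===== PORT A =====
-- A's inner 'for pat in patterns: if clean == pat.lower() or pat.lower() in clean: …; break'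
-- (true ↔ the break is reached)
def pvPatMatch (clean : String) : List String → Bool
  | [] => false
  | p :: ps =>
    if clean == PySem.Str.lower p || PySem.Str.isIn (PySem.Str.lower p) clean then true
    else pvPatMatch clean ps

def auto_map_expressions (shape_keys : List (String × List String)) : List (String × List (String × String)) :=
  let all_keys : List (String × String) :=
    shape_keys.foldl (fun acc p => p.2.foldl (fun a k => a ++ [(p.1, k)]) acc) []
  let mapping : PySem.Dict String (List (String × String)) :=
    pvPatterns.foldl (fun m ep =>
      all_keys.foldl (fun m2 mk =>
        if pvPatMatch (PySem.Str.strip (PySem.Str.lower mk.2)) ep.2 then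
          (if m2.contains ep.1 then m2 else m2.insert ep.1 []).modify ep.1 [] (fun v => v ++ [mk])
        else m2) m)
      PySem.Dict.empty
  mapping.items

-- ===== PORT B =====
def auto_map_expressions_alt (shape_keys : List (String × List String)) : List (String × List (String × String)) :=
  let all_keys : List (String × String) :=
    shape_keys.flatMap (fun p => p.2.map (fun k => (p.1, k)))
  let tagged : List (String × String × PySem.Set String) :=
    all_keys.map (fun mk =>
      let clean := PySem.Str.strip (PySem.Str.lower mk.2)
      (mk.1, mk.2,
        PySem.Set.ofList ((pvPatterns.filter
          (fun q => q.2.any (fun p => PySem.Str.isIn (PySem.Str.lower p) clean))).map Prod.fst)))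
  let result : PySem.Dict String (List (String × String)) :=
    (pvPatterns.map Prod.fst).foldl (fun r e =>
      let hits := (tagged.filter (fun t => PySem.Set.contains t.2.2 e)).map (fun t => (t.1, t.2.1))
      if hits.isEmpty then r else r.insert e hits) PySem.Dict.empty
  result.items

-- ===== PRECONDITION & SPEC =====
def Spec_auto_map_expressions (shape_keys : List (String × List String)) (out : List (String × List (String × String))) : Prop := out = auto_map_expressions_alt shape_keys
instance (shape_keys : List (String × List String)) (out : List (String × List (String × String))) : Decidable (Spec_auto_map_expressions shape_keys out) := by unfold Spec_auto_map_expressions; infer_instance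

-- ===== CLAIM (what is proved, stated in full; the proofs are below) =====
def Claim_equal_auto_map_expressions : Prop := ∀ (shape_keys : List (String × List String)), Dom_auto_map_expressions shape_keys → Spec_auto_map_expressions shape_keys (auto_map_expressions shape_keys)

-- ===== LEMMAS AND PROOFS =====

-- whether key mk hits the pattern list ps
def pvHit (ps : List String) (mk : String × String) : Bool :=
  pvPatMatch (PySem.Str.strip (PySem.Str.lower mk.2)) ps

def pvHits (ps : List String) (ks : List (String × String)) : List (String × String) := ks.filter (pvHit ps)

-- ------- A-side characterization -------
def pvInnerA (e : String) (ps : List String) (m : PySem.Dict String (List (String × String)))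
    (ks : List (String × String)) : PySem.Dict String (List (String × String)) :=
  ks.foldl (fun m2 mk =>
    if pvHit ps mk then
      (if m2.contains e then m2 else m2.insert e []).modify e [] (fun v => v ++ [mk])
    else m2) m

theorem innerA_cons (e : String) (ps : List String) (mk : String × String) (t : List (String × String))
    (m : PySem.Dict String (List (String × String))) :
    pvInnerA e ps m (mk :: t) =
      pvInnerA e ps
        (if pvHit ps mk then
          (if m.contains e then m else m.insert e []).modify e [] (fun v => v ++ [mk])
        else m) t := rfl

theorem innerA_getD_ne (e k' : String) (h : k' ≠ e) (ps : List String) (ks : List (String × String))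
    (m : PySem.Dict String (List (String × String))) :
    (pvInnerA e ps m ks).getD k' [] = m.getD k' [] := by
  induction ks generalizing m with
  | nil => rfl
  | cons mk t ih =>
    rw [innerA_cons, ih]
    by_cases hm : pvHit ps mk
    · rw [if_pos hm]
      simp [PySem.Dict.getD_modify, h]
      split <;> simp [PySem.Dict.getD_insert, h]
    · rw [if_neg hm]

theorem innerA_getD_self (e : String) (ps : List String) (ks : List (String × String))
    (m : PySem.Dict String (List (String × String))) :
    (pvInnerA e ps m ks).getD e [] = m.getD e [] ++ pvHits ps ks := by
  induction ks generalizing m with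
  | nil => simp [pvInnerA, pvHits]
  | cons mk t ih =>
    rw [innerA_cons, ih]
    by_cases hm : pvHit ps mk
    · rw [if_pos hm]
      have h2 : ((if m.contains e then m else m.insert e []).modify e [] (fun v => v ++ [mk])).getD e []
          = m.getD e [] ++ [mk] := by
        split
        · simp [PySem.Dict.getD_modify_self]
        · next hc =>
          rw [PySem.Dict.getD_modify_self, PySem.Dict.getD_insert_self,
            PySem.Dict.getD_of_not_contains m _ (by simpa using hc)]
      rw [h2]
      simp [pvHits, hm]
    · rw [if_neg hm]
      simp [pvHits, hm]

theorem innerA_keys (e : String) (ps : List String) (ks : List (String × String))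
    (m : PySem.Dict String (List (String × String))) :
    (pvInnerA e ps m ks).keys =
      m.keys ++ (if !m.contains e && !(pvHits ps ks).isEmpty then [e] else []) := by
  induction ks generalizing m with
  | nil => simp [pvInnerA, pvHits]
  | cons mk t ih =>
    rw [innerA_cons, ih]
    by_cases hm : pvHit ps mk
    · rw [if_pos hm]
      by_cases hc : m.contains e
      · rw [if_pos hc]
        have hc2 : (m.modify e [] (fun v => v ++ [mk])).contains e := by
          simp [PySem.Dict.contains_modify, hc]
        rw [PySem.Dict.keys_modify, PySem.Dict.keys_insert_of_contains _ _ hc]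
        simp [hc2, hc]
      · rw [if_neg hc]
        have hc2 : ((m.insert e []).modify e [] (fun v => v ++ [mk])).contains e := by
          simp [PySem.Dict.contains_modify]
        have hk : ((m.insert e []).modify e [] (fun v => v ++ [mk])).keys = m.keys ++ [e] := by
          rw [PySem.Dict.keys_modify, PySem.Dict.keys_insert_of_contains _ _ (by simp [PySem.Dict.contains_insert_self]),
            PySem.Dict.keys_insert_of_not_contains _ _ (by simpa using hc)]
        simp [hc2, hk, hc, pvHits, hm]
    · rw [if_neg hm]
      have : pvHits ps (mk :: t) = pvHits ps t :=
        List.filter_cons_of_neg (by simpa using hm)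
      rw [this]

def pvOuterA (E : List (String × List String)) (m : PySem.Dict String (List (String × String)))
    (ks : List (String × String)) : PySem.Dict String (List (String × String)) :=
  E.foldl (fun m ep => pvInnerA ep.1 ep.2 m ks) m

theorem outerA_getD_not_mem (E : List (String × List String)) (k' : String)
    (h : k' ∉ E.map Prod.fst) (ks : List (String × String))
    (m : PySem.Dict String (List (String × String))) :
    (pvOuterA E m ks).getD k' [] = m.getD k' [] := by
  induction E generalizing m with
  | nil => rfl
  | cons ep t ih =>
    have h1 : k' ≠ ep.1 := by simp at h; exact fun hh => h.1 hh
    have h2 : k' ∉ t.map Prod.fst := by simp at h ⊢; exact h.2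
    show (pvOuterA t _ ks).getD k' [] = _
    rw [ih h2, innerA_getD_ne _ _ h1]

theorem outerA_keys_fresh (E : List (String × List String)) (ks : List (String × String))
    (m : PySem.Dict String (List (String × String)))
    (hfresh : ∀ q ∈ E, m.contains q.1 = false) (hnd : (E.map Prod.fst).Nodup) :
    (pvOuterA E m ks).keys =
      m.keys ++ (E.filter (fun ep => !(pvHits ep.2 ks).isEmpty)).map Prod.fst := by
  induction E generalizing m with
  | nil => simp [pvOuterA]
  | cons ep t ih =>
    have hce : m.contains ep.1 = false := hfresh ep (by simp)
    have hk1 : (pvInnerA ep.1 ep.2 m ks).keys =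
        m.keys ++ (if !(pvHits ep.2 ks).isEmpty then [ep.1] else []) := by
      rw [innerA_keys]; simp [hce]
    have hnd' : (List.map Prod.fst t).Nodup ∧ ep.1 ∉ List.map Prod.fst t := by
      rw [List.map_cons, List.nodup_cons] at hnd; exact ⟨hnd.2, hnd.1⟩
    have hfresh' : ∀ q ∈ t, (pvInnerA ep.1 ep.2 m ks).contains q.1 = false := by
      intro q hq
      have hq1 : q.1 ≠ ep.1 := fun hh => hnd'.2 (hh ▸ List.mem_map_of_mem hq)
      have hmem : q.1 ∉ (pvInnerA ep.1 ep.2 m ks).keys := by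
        rw [hk1]
        simp only [List.mem_append]
        rintro (h1 | h2)
        · exact absurd ((PySem.Dict.contains_iff_mem_keys m q.1).2 h1)
            (by simp [hfresh q (List.mem_cons_of_mem _ hq)])
        · revert h2; split <;> simp [hq1]
      exact Bool.eq_false_iff.2 (fun hc => hmem ((PySem.Dict.contains_iff_mem_keys _ _).1 hc))
    show (pvOuterA t _ ks).keys = _
    rw [ih _ hfresh' hnd'.1, hk1]
    simp [List.filter_cons]
    split <;> simp

theorem contains_innerA_of_ne (e k' : String) (h : k' ≠ e) (ps : List String)
    (ks : List (String × String)) (m : PySem.Dict String (List (String × String)))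
    (hc : m.contains k' = false) : (pvInnerA e ps m ks).contains k' = false := by
  have hk := innerA_keys e ps ks m
  apply Bool.eq_false_iff.2
  intro hcc
  have := (PySem.Dict.contains_iff_mem_keys _ _).1 hcc
  rw [hk] at this
  simp only [List.mem_append] at this
  rcases this with h1 | h2
  · exact absurd ((PySem.Dict.contains_iff_mem_keys m k').2 h1) (by simp [hc])
  · revert h2; split <;> simp [h]

theorem outerA_getD_mem (E : List (String × List String)) (ks : List (String × String))
    (m : PySem.Dict String (List (String × String)))
    (hfresh : ∀ q ∈ E, m.contains q.1 = false) (hnd : (E.map Prod.fst).Nodup) :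
    ∀ ep ∈ E, (pvOuterA E m ks).getD ep.1 [] = pvHits ep.2 ks := by
  induction E generalizing m with
  | nil => simp
  | cons f t ih =>
    have hnd' : (List.map Prod.fst t).Nodup ∧ f.1 ∉ List.map Prod.fst t := by
      rw [List.map_cons, List.nodup_cons] at hnd; exact ⟨hnd.2, hnd.1⟩
    have hcf : m.contains f.1 = false := hfresh f (by simp)
    have hfresh' : ∀ q ∈ t, (pvInnerA f.1 f.2 m ks).contains q.1 = false := by
      intro q hq
      refine contains_innerA_of_ne _ _ (fun hh => hnd'.2 ?_) _ _ _
        (hfresh q (List.mem_cons_of_mem _ hq))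
      exact hh ▸ List.mem_map_of_mem hq
    intro ep hep
    rcases List.mem_cons.1 hep with rfl | hmem
    · show (pvOuterA t _ ks).getD ep.1 [] = _
      rw [outerA_getD_not_mem _ _ hnd'.2, innerA_getD_self,
        PySem.Dict.getD_of_not_contains m _ hcf]
      simp
    · show (pvOuterA t _ ks).getD ep.1 [] = _
      exact ih _ hfresh' hnd'.1 ep hmem

def pvFlat (shape_keys : List (String × List String)) : List (String × String) :=
  shape_keys.flatMap (fun p => p.2.map (fun k => (p.1, k)))

theorem patterns_fst_nodup : (pvPatterns.map Prod.fst).Nodup := by decide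

theorem flat_eq (sk : List (String × List String)) :
    sk.foldl (fun acc p => p.2.foldl (fun a k => a ++ [(p.1, k)]) acc) [] = pvFlat sk := by
  have h : ∀ (l : List (String × List String)) (acc : List (String × String)),
      l.foldl (fun acc p => p.2.foldl (fun a k => a ++ [(p.1, k)]) acc) acc =
        acc ++ pvFlat l := by
    intro l
    induction l with
    | nil => simp [pvFlat]
    | cons p t ih =>
      intro acc
      rw [List.foldl_cons, PySem.List.foldl_append_singleton_eq_map, ih]
      simp [pvFlat]
  simpa using h sk []

theorem A_items (ks : List (String × String)) :
    (pvOuterA pvPatterns PySem.Dict.empty ks).items =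
      (pvPatterns.filter (fun ep => !(pvHits ep.2 ks).isEmpty)).map
        (fun ep => (ep.1, pvHits ep.2 ks)) := by
  have hAkeys : (pvOuterA pvPatterns PySem.Dict.empty ks).keys =
      (pvPatterns.filter (fun ep => !(pvHits ep.2 ks).isEmpty)).map Prod.fst := by
    rw [outerA_keys_fresh pvPatterns ks PySem.Dict.empty
      (fun q _ => by simp [PySem.Dict.contains_empty]) patterns_fst_nodup]
    simp [PySem.Dict.keys_empty]
  have hAnodup : (pvOuterA pvPatterns PySem.Dict.empty ks).keys.Nodup := by
    rw [hAkeys]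
    exact patterns_fst_nodup.sublist (List.Sublist.map Prod.fst List.filter_sublist)
  rw [PySem.Dict.items_eq_map_keys _ hAnodup [], hAkeys, List.map_map]
  refine List.map_congr_left (fun ep hep => ?_)
  have hmem : ep ∈ pvPatterns := List.mem_of_mem_filter hep
  simp only [Function.comp]
  rw [outerA_getD_mem pvPatterns ks PySem.Dict.empty
    (fun q _ => by simp [PySem.Dict.contains_empty]) patterns_fst_nodup ep hmem]

theorem portA_eq (sk : List (String × List String)) :
    auto_map_expressions sk = (pvOuterA pvPatterns PySem.Dict.empty (pvFlat sk)).items := by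
  show (pvOuterA pvPatterns PySem.Dict.empty
    (sk.foldl (fun acc p => p.2.foldl (fun a k => a ++ [(p.1, k)]) acc) [])).items = _
  rw [flat_eq]

-- ------- B-side characterization -------

-- A's first-match test equals B's pure any-substring test: equality implies containment
theorem patMatch_eq_any (clean : String) (ps : List String) :
    pvPatMatch clean ps = ps.any (fun p => PySem.Str.isIn (PySem.Str.lower p) clean) := by
  induction ps with
  | nil => rfl
  | cons p t ih =>
    show (if _ then true else pvPatMatch clean t) = _
    by_cases he : clean = PySem.Str.lower p
    · have hin : PySem.Str.isIn (PySem.Str.lower p) clean = true := by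
        rw [PySem.Str.isIn_iff_infix, ← he]
      have hr : (p :: t).any (fun p => PySem.Str.isIn (PySem.Str.lower p) clean) = true := by
        simp only [List.any_cons, hin, Bool.true_or]
      rw [hr]
      simp [he]
    · have hbe : (clean == PySem.Str.lower p) = false := by simpa using he
      simp only [List.any_cons, hbe, Bool.false_or, ih]
      by_cases hin : PySem.Str.isIn (PySem.Str.lower p) clean <;> simp [hin]

-- the tag set of a key contains e ∈ E iff e's patterns hit the key (E with distinct names)
theorem tag_contains (E : List (String × List String)) (hnd : (E.map Prod.fst).Nodup)
    (ep : String × List String) (hep : ep ∈ E) (clean : String) :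
    PySem.Set.contains
      (PySem.Set.ofList ((E.filter
        (fun q => q.2.any (fun p => PySem.Str.isIn (PySem.Str.lower p) clean))).map Prod.fst)) ep.1
      = pvPatMatch clean ep.2 := by
  rw [patMatch_eq_any]
  rcases hb : ep.2.any (fun p => PySem.Str.isIn (PySem.Str.lower p) clean) with _ | _
  · apply Bool.eq_false_iff.2
    intro hc
    have hmem : ep.1 ∈ (E.filter
        (fun q => q.2.any (fun p => PySem.Str.isIn (PySem.Str.lower p) clean))).map Prod.fst := by
      unfold PySem.Set.contains at hc
      simpa [PySem.Set.mem_ofList] using hc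
    rcases List.mem_map.1 hmem with ⟨q, hq, hq1⟩
    have hqmem : q ∈ E := List.mem_of_mem_filter hq
    have hqp : q.2.any (fun p => PySem.Str.isIn (PySem.Str.lower p) clean) = true :=
      by simpa using (List.mem_filter.1 hq).2
    have hqe : q = ep := List.inj_on_of_nodup_map hnd hqmem hep hq1
    rw [hqe, hb] at hqp
    exact Bool.false_ne_true hqp
  · have hmem : ep.1 ∈ (E.filter
        (fun q => q.2.any (fun p => PySem.Str.isIn (PySem.Str.lower p) clean))).map Prod.fst :=
      List.mem_map_of_mem (List.mem_filter.2 ⟨hep, by simpa using hb⟩)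
    unfold PySem.Set.contains
    simpa [PySem.Set.mem_ofList] using hmem

-- conditional insert-fold = insert-fold over the filtered list
theorem cond_foldl_insert {α : Type} (l : List α) (c : α → Bool) (key : α → String)
    (f : α → List (String × String)) (d : PySem.Dict String (List (String × String))) :
    l.foldl (fun r x => if c x then r.insert (key x) (f x) else r) d =
      (l.filter c).foldl (fun r x => r.insert (key x) (f x)) d := by
  induction l generalizing d with
  | nil => rfl
  | cons x t ih =>
    by_cases hc : c x
    · simp [hc, ih]
    · simp [hc, ih]

-- B's two stages, characterized for any pattern table E with distinct names
theorem B_gen (E : List (String × List String)) (hnd : (E.map Prod.fst).Nodup)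
    (flat : List (String × String)) :
    ((E.map Prod.fst).foldl (fun r e =>
        let hits := ((flat.map (fun mk =>
            (mk.1, mk.2, PySem.Set.ofList ((E.filter (fun q => q.2.any (fun p =>
              PySem.Str.isIn (PySem.Str.lower p)
                (PySem.Str.strip (PySem.Str.lower mk.2))))).map Prod.fst)))).filter
            (fun t => PySem.Set.contains t.2.2 e)).map (fun t => (t.1, t.2.1))
        if hits.isEmpty then r else r.insert e hits) PySem.Dict.empty).items
    = (E.filter (fun ep => !(pvHits ep.2 flat).isEmpty)).map
        (fun ep => (ep.1, pvHits ep.2 flat)) := by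
  have hhits : ∀ ep ∈ E,
      ((flat.map (fun mk =>
          (mk.1, mk.2, PySem.Set.ofList ((E.filter (fun q => q.2.any (fun p =>
            PySem.Str.isIn (PySem.Str.lower p)
              (PySem.Str.strip (PySem.Str.lower mk.2))))).map Prod.fst)))).filter
          (fun t => PySem.Set.contains t.2.2 ep.1)).map (fun t => (t.1, t.2.1))
        = pvHits ep.2 flat := by
    intro ep hep
    rw [List.filter_map, List.map_map]
    rw [List.filter_congr (fun mk _ =>
      tag_contains E hnd ep hep (PySem.Str.strip (PySem.Str.lower mk.2)))]
    exact List.map_id' _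
  -- name the per-expression hit computation H and fold with it
  set H : String → List (String × String) := fun e =>
    ((flat.map (fun mk =>
        (mk.1, mk.2, PySem.Set.ofList ((E.filter (fun q => q.2.any (fun p =>
          PySem.Str.isIn (PySem.Str.lower p)
            (PySem.Str.strip (PySem.Str.lower mk.2))))).map Prod.fst)))).filter
        (fun t => PySem.Set.contains t.2.2 e)).map (fun t => (t.1, t.2.1)) with hH
  show ((E.map Prod.fst).foldl (fun r e =>
      if (H e).isEmpty then r else r.insert e (H e)) PySem.Dict.empty).items = _
  have hH' : ∀ ep ∈ E, H ep.1 = pvHits ep.2 flat := hhits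
  have hstep : (fun (r : PySem.Dict String (List (String × String))) e =>
      if (H e).isEmpty then r else r.insert e (H e)) =
      (fun r e => if !(H e).isEmpty then r.insert e (H e) else r) := by
    funext r e
    by_cases h : (H e).isEmpty <;> simp [h]
  rw [hstep, cond_foldl_insert (E.map Prod.fst) (fun e => !(H e).isEmpty)
    (fun e => e) H PySem.Dict.empty]
  rw [PySem.Dict.items_foldl_insert_fresh _ (fun e => e) H _
    (fun a _ => by simp [PySem.Dict.contains_empty])
    (by simpa using (hnd.sublist List.filter_sublist))]
  rw [List.filter_map, List.map_map]
  rw [List.filter_congr (fun ep (hep : ep ∈ E) => by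
    show (!(H ep.1).isEmpty) = (!(pvHits ep.2 flat).isEmpty)
    rw [hH' ep hep])]
  rw [List.map_congr_left (fun ep (hep : ep ∈ E.filter (fun ep => !(pvHits ep.2 flat).isEmpty)) => by
    show (ep.1, H ep.1) = (ep.1, pvHits ep.2 flat)
    rw [hH' ep (List.mem_of_mem_filter hep)])]
  have he : (PySem.Dict.empty : PySem.Dict String (List (String × String))).items = [] := rfl
  rw [he, List.nil_append]

theorem B_items (sk : List (String × List String)) :
    auto_map_expressions_alt sk =
      (pvPatterns.filter (fun ep => !(pvHits ep.2 (pvFlat sk)).isEmpty)).map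
        (fun ep => (ep.1, pvHits ep.2 (pvFlat sk))) :=
  B_gen pvPatterns patterns_fst_nodup (pvFlat sk)

-- ===== VERDICT (by name: the statement is the Claim_ definition above) =====
theorem auto_map_expressions_spec : Claim_equal_auto_map_expressions := by
  intro sk _
  show auto_map_expressions sk = auto_map_expressions_alt sk
  rw [portA_eq, A_items, B_items]
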